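-- pv_equiv track=rewrite | github.com/rbaron/advent-of-code-2021 | day09/main.py | part2
-- ===== SOURCE A (Python) =====
-- from collections import defaultdict
-- from functools import lru_cache
-- from math import prod
--
-- def neighbors(y, x, height, width):
--     if y < height - 1:
--         yield (y + 1, x)
--     if y > 0:
--         yield (y - 1, x)
--     if x < width - 1:
--         yield (y, x + 1)
--     if x > 0:
--         yield (y, x - 1)
--
-- def part2(heights):
--     height = len(heights)
--     width = len(heights[0])
--
--     @lru_cache(maxsize=None)
--     def descent(y, x):
--         if heights[y][x] == 9:
--             return (-1, -1)
--
--         for (ny, nx) in neighbors(y, x, height, width):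
--             if heights[ny][nx] < heights[y][x]:
--                 return descent(ny, nx)
--         # We're at a local min.
--         return (y, x)
--
--     size_by_basin_coords = defaultdict(int)
--     for y, _ in enumerate(heights):
--         for x, _ in enumerate(heights[y]):
--             size_by_basin_coords[descent(y, x)] += 1
--
--     return prod(sorted((size for (y, x), size in size_by_basin_coords.items()
--                         if x >= 0), reverse=True)[:3])
-- ===== SOURCE B (Python) =====
-- from math import prod
--
-- def part2(heights):
--     h = len(heights)
--     w = len(heights[0])
--     # Process cells in ascending order of height: any strictly-smaller neighbor
--     # has already been resolved, so each cell's basin endpoint is computed in one step.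
--     end = {}
--     for hv, y, x in sorted((heights[y][x], y, x) for y in range(h) for x in range(w)):
--         if hv == 9:
--             end[(y, x)] = (-1, -1)
--         else:
--             for ny, nx in ((y + 1, x), (y - 1, x), (y, x + 1), (y, x - 1)):
--                 if 0 <= ny < h and 0 <= nx < w and heights[ny][nx] < hv:
--                     end[(y, x)] = end[(ny, nx)]
--                     break
--             else:
--                 end[(y, x)] = (y, x)
--     counts = {}
--     for y in range(h):
--         for x in range(w):
--             k = end[(y, x)]
--             counts[k] = counts.get(k, 0) + 1
--     sizes = sorted((s for (ky, kx), s in counts.items() if kx >= 0), reverse=True)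
--     return prod(sizes[:3])
-- ===== Notes on version B (the rewrite author's own statement) =====
-- stated objective: alternative
-- what changed: Replaces the memoized recursive greedy descent with a topological dynamic program: cells are sorted by ascending height once, so each cell's basin endpoint is read off from its (already resolved) first strictly-smaller neighbor in O(1), with no recursion and no cache.
-- outside the precondition, e.g. on part2([[1, 2, 9], [3, 4]]): A returns 4, B raises IndexError
import Mathlib
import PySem

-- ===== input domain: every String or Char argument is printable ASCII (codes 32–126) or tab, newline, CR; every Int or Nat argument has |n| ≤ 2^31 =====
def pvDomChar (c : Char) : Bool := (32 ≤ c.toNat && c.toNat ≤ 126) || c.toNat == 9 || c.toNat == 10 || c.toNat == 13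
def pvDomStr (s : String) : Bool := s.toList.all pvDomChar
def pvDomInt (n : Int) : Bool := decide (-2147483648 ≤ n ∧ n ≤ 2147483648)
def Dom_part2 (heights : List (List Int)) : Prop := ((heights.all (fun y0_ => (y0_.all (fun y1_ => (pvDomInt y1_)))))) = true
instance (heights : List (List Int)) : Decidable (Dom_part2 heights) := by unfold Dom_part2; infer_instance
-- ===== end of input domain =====

-- B replaces A's memoized recursive greedy descent by a sort-by-height dynamic program; equal on all
-- non-empty rectangular grids (return value only — neither program mutates its argument).

-- ======================= PORT A =======================
-- heights[y][x]; under Pre_ every access either port makes is in range, where pyGetD is exact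
def at2 (g : List (List Int)) (y x : Int) : Int :=
  PySem.List.pyGetD (PySem.List.pyGetD g y []) x 0

-- d[k] += 1 on a defaultdict(int) / counts[k] = counts.get(k, 0) + 1 (both Pythons do exactly this)
def bump (d : PySem.Dict (Int × Int) Int) (k : Int × Int) : PySem.Dict (Int × Int) Int :=
  d.insert k (d.getD k 0 + 1)

-- the identical final line of both Pythons:
-- prod(sorted((size for (y, x), size in d.items() if x >= 0), reverse=True)[:3])
def tailProd (d : PySem.Dict (Int × Int) Int) : Int :=
  ((PySem.List.sorted ((d.items.filter (fun kv => decide (0 ≤ kv.1.2))).map (·.2))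
      (fun s => s) true).take 3).foldl (· * ·) 1

-- A's `descent`, neighbors scanned in A's order (down, up, right, left).  The recursion strictly
-- decreases the cell height, so a path visits distinct cells; fuel = #cells + 1 is a totality
-- guard only, never exhausted on Pre_ inputs (the fuel-0 branch is unreachable there).
def descentA (g : List (List Int)) (h w : Int) : Nat → Int → Int → Int × Int
  | 0, y, x => (y, x)
  | fuel+1, y, x =>
    if at2 g y x = 9 then (-1, -1)
    else if y < h - 1 ∧ at2 g (y+1) x < at2 g y x then descentA g h w fuel (y+1) x
    else if 0 < y ∧ at2 g (y-1) x < at2 g y x then descentA g h w fuel (y-1) x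
    else if x < w - 1 ∧ at2 g y (x+1) < at2 g y x then descentA g h w fuel y (x+1)
    else if 0 < x ∧ at2 g y (x-1) < at2 g y x then descentA g h w fuel y (x-1)
    else (y, x)

def part2 (heights : List (List Int)) : Int :=
  let h : Int := heights.length
  let w : Int := (PySem.List.pyGetD heights 0 []).length
  let fuel : Nat := heights.flatten.length + 1
  let d : PySem.Dict (Int × Int) Int :=
    (PySem.List.enumerate heights).foldl (fun d p =>
      (PySem.List.enumerate p.2).foldl (fun d q =>
        bump d (descentA heights h w fuel p.1 q.1)) d) PySem.Dict.empty
  tailProd d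

-- ======================= PORT B =======================
-- sorted((heights[y][x], y, x) for y in range(h) for x in range(w)), ascending by height (stable)
def bCells (g : List (List Int)) (h w : Int) : List (Int × Int × Int) :=
  PySem.List.sorted
    ((PySem.List.pyRange 0 h 1).flatMap (fun y =>
      (PySem.List.pyRange 0 w 1).map (fun x => (at2 g y x, y, x))))
    (fun c => c.1) false

-- the body of B's first loop; end[(ny,nx)] was inserted earlier (strictly smaller height comes
-- earlier in the sorted order), so getD's default is unreachable
def bStep (g : List (List Int)) (h w : Int) (e : PySem.Dict (Int × Int) (Int × Int))
    (c : Int × Int × Int) : PySem.Dict (Int × Int) (Int × Int) :=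
  if c.1 = 9 then e.insert (c.2.1, c.2.2) (-1, -1)
  else if 0 ≤ c.2.1+1 ∧ c.2.1+1 < h ∧ 0 ≤ c.2.2 ∧ c.2.2 < w ∧ at2 g (c.2.1+1) c.2.2 < c.1 then
    e.insert (c.2.1, c.2.2) (e.getD (c.2.1+1, c.2.2) (c.2.1+1, c.2.2))
  else if 0 ≤ c.2.1-1 ∧ c.2.1-1 < h ∧ 0 ≤ c.2.2 ∧ c.2.2 < w ∧ at2 g (c.2.1-1) c.2.2 < c.1 then
    e.insert (c.2.1, c.2.2) (e.getD (c.2.1-1, c.2.2) (c.2.1-1, c.2.2))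
  else if 0 ≤ c.2.1 ∧ c.2.1 < h ∧ 0 ≤ c.2.2+1 ∧ c.2.2+1 < w ∧ at2 g c.2.1 (c.2.2+1) < c.1 then
    e.insert (c.2.1, c.2.2) (e.getD (c.2.1, c.2.2+1) (c.2.1, c.2.2+1))
  else if 0 ≤ c.2.1 ∧ c.2.1 < h ∧ 0 ≤ c.2.2-1 ∧ c.2.2-1 < w ∧ at2 g c.2.1 (c.2.2-1) < c.1 then
    e.insert (c.2.1, c.2.2) (e.getD (c.2.1, c.2.2-1) (c.2.1, c.2.2-1))
  else e.insert (c.2.1, c.2.2) (c.2.1, c.2.2)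

-- B's `end` dict after the first loop
def bEnd (g : List (List Int)) (h w : Int) : PySem.Dict (Int × Int) (Int × Int) :=
  (bCells g h w).foldl (bStep g h w) PySem.Dict.empty

def part2_alt (heights : List (List Int)) : Int :=
  let h : Int := heights.length
  let w : Int := (PySem.List.pyGetD heights 0 []).length
  let endD := bEnd heights h w
  let counts : PySem.Dict (Int × Int) Int :=
    (PySem.List.pyRange 0 h 1).foldl (fun d y =>
      (PySem.List.pyRange 0 w 1).foldl (fun d x =>
        -- end[(y,x)]: every grid cell is a key of endD, so getD's default is unreachable
        bump d (endD.getD (y, x) (y, x))) d) PySem.Dict.empty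
  tailProd counts

-- ===== PRECONDITION & SPEC =====
-- Pre_ excludes the empty grid (A raises IndexError on heights[0]) and ragged grids: there A
-- usually raises IndexError, and where it happens to return, its value depends on accidentally
-- descending through cells outside the width-of-row-0 grid — an artefact of A's implementation.
def Pre_part2 (heights : List (List Int)) : Prop :=
  heights ≠ [] ∧ ∀ row ∈ heights, row.length = (heights.headD []).length
instance (heights : List (List Int)) : Decidable (Pre_part2 heights) := by
  unfold Pre_part2; infer_instance

def pvWitness_part2 : List (List Int) := [[2, 1, 9], [9, 3, 9], [9, 9, 0]]

def Spec_part2 (heights : List (List Int)) (out : Int) : Prop := out = part2_alt heights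
instance (heights : List (List Int)) (out : Int) : Decidable (Spec_part2 heights out) := by
  unfold Spec_part2; infer_instance

-- ===== CLAIM (what is proved, stated in full; the proofs are below) =====
def Claim_equal_part2 : Prop :=
  ∀ (heights : List (List Int)), Dom_part2 heights → Pre_part2 heights →
    Spec_part2 heights (part2 heights)

-- ===== LEMMAS AND PROOFS =====

-- (y,x) is a grid coordinate
def validC (h w y x : Int) : Prop := 0 ≤ y ∧ y < h ∧ 0 ≤ x ∧ x < w

-- all grid coordinates, row-major
def allCoords (h w : Int) : List (Int × Int) :=
  (PySem.List.pyRange 0 h 1).flatMap (fun y => (PySem.List.pyRange 0 w 1).map (fun x => (y, x)))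

-- number of cells strictly lower than (y,x): the termination measure of A's descent
def meas (g : List (List Int)) (h w y x : Int) : Nat :=
  (allCoords h w).countP (fun c => at2 g c.1 c.2 < at2 g y x)

lemma mem_allCoords {h w y x : Int} : (y, x) ∈ allCoords h w ↔ validC h w y x := by
  simp [allCoords, validC, List.mem_flatMap, PySem.List.mem_pyRange_one]
  tauto

lemma nodup_allCoords (h w : Int) : (allCoords h w).Nodup := by
  unfold allCoords
  rw [List.nodup_flatMap]
  constructor
  · intro y _
    exact (PySem.List.nodup_pyRange_one 0 w).map (fun a b hab => by simpa using hab)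
  · apply List.Pairwise.imp ?_ (PySem.List.pairwise_lt_pyRange_one 0 h)
    intro a b hab p hp hq
    simp only [List.mem_map] at hp hq
    obtain ⟨x1, _, rfl⟩ := hp
    obtain ⟨x2, _, h2⟩ := hq
    cases h2; omega

-- strict countP monotonicity (Mathlib has only the non-strict List.countP_mono_left)
lemma countP_lt_of_mem {α : Type} {l : List α} {p q : α → Bool}
    (hmono : ∀ a ∈ l, p a = true → q a = true) {a : α} (ha : a ∈ l)
    (hq : q a = true) (hp : p a = false) : l.countP p < l.countP q := by
  induction l with
  | nil => cases ha
  | cons b t ih =>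
    have h1 : t.countP p ≤ t.countP q :=
      List.countP_mono_left (fun x hx => hmono x (List.mem_cons_of_mem _ hx))
    rcases List.mem_cons.1 ha with rfl | hat
    · simp [hp, hq]; omega
    · have := ih (fun x hx => hmono x (List.mem_cons_of_mem _ hx)) hat
      simp [List.countP_cons]
      split_ifs with h1 h2 <;> simp_all

lemma meas_lt {g : List (List Int)} {h w y x ny nx : Int}
    (_hv : validC h w y x) (hn : validC h w ny nx)
    (hlt : at2 g ny nx < at2 g y x) : meas g h w ny nx < meas g h w y x := by
  unfold meas
  apply countP_lt_of_mem (a := (ny, nx))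
  · intro a _ hpa
    simp only [decide_eq_true_eq] at hpa ⊢
    omega
  · exact mem_allCoords.2 hn
  · simpa using hlt
  · simp

lemma meas_le (g : List (List Int)) (h w y x : Int) :
    meas g h w y x ≤ (allCoords h w).length := List.countP_le_length

theorem descentA_stable (g : List (List Int)) (h w : Int) :
    ∀ (k : Nat) (y x : Int), validC h w y x → meas g h w y x < k →
      ∀ f1 f2, meas g h w y x < f1 → meas g h w y x < f2 →
        descentA g h w f1 y x = descentA g h w f2 y x := by
  intro k
  induction k with
  | zero => omega
  | succ k ih =>
    intro y x hval hk f1 f2 hf1 hf2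
    obtain ⟨a, rfl⟩ : ∃ a, f1 = a + 1 := ⟨f1 - 1, by omega⟩
    obtain ⟨b, rfl⟩ : ∃ b, f2 = b + 1 := ⟨f2 - 1, by omega⟩
    obtain ⟨hy0, hyh, hx0, hxw⟩ := hval
    simp only [descentA]
    split_ifs with h9 c1 c2 c3 c4
    · rfl
    all_goals try rfl
    · -- down
      have hnv : validC h w (y+1) x := by unfold validC; omega
      have hm : meas g h w (y+1) x < meas g h w y x := meas_lt ⟨hy0,hyh,hx0,hxw⟩ hnv c1.2
      exact ih (y+1) x hnv (by omega) a b (by omega) (by omega)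
    · have hnv : validC h w (y-1) x := by unfold validC; omega
      have hm := meas_lt (g := g) ⟨hy0,hyh,hx0,hxw⟩ hnv c2.2
      exact ih (y-1) x hnv (by omega) a b (by omega) (by omega)
    · have hnv : validC h w y (x+1) := by unfold validC; omega
      have hm := meas_lt (g := g) ⟨hy0,hyh,hx0,hxw⟩ hnv c3.2
      exact ih y (x+1) hnv (by omega) a b (by omega) (by omega)
    · have hnv : validC h w y (x-1) := by unfold validC; omega
      have hm := meas_lt (g := g) ⟨hy0,hyh,hx0,hxw⟩ hnv c4.2
      exact ih y (x-1) hnv (by omega) a b (by omega) (by omega)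

lemma mem_bCells {g : List (List Int)} {h w : Int} {c : Int × Int × Int} :
    c ∈ bCells g h w ↔ c = (at2 g c.2.1 c.2.2, c.2.1, c.2.2) ∧ validC h w c.2.1 c.2.2 := by
  rw [bCells, PySem.List.mem_sorted]
  simp only [List.mem_flatMap, List.mem_map, PySem.List.mem_pyRange_one, validC]
  constructor
  · rintro ⟨y, ⟨hy0, hyh⟩, x, ⟨hx0, hxw⟩, rfl⟩
    exact ⟨rfl, hy0, hyh, hx0, hxw⟩
  · rintro ⟨hc, hy0, hyh, hx0, hxw⟩
    exact ⟨c.2.1, ⟨hy0, hyh⟩, c.2.2, ⟨hx0, hxw⟩, hc.symm⟩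

lemma nodup_coords_bCells (g : List (List Int)) (h w : Int) :
    ((bCells g h w).map (·.2)).Nodup := by
  have hperm : ((bCells g h w).map (·.2)).Perm (allCoords h w) := by
    have h1 := (PySem.List.sorted_perm
      ((PySem.List.pyRange 0 h 1).flatMap (fun y =>
        (PySem.List.pyRange 0 w 1).map (fun x => (at2 g y x, y, x)))) (fun c => c.1) false).map (·.2)
    refine h1.trans ?_
    rw [List.map_flatMap]
    apply List.Perm.of_eq
    unfold allCoords
    congr 1
    funext y
    rw [List.map_map]
    rfl
  exact (hperm.nodup_iff).2 (nodup_allCoords h w)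

lemma bStep_get?_ne (g : List (List Int)) (h w : Int) (e : PySem.Dict (Int × Int) (Int × Int))
    (c : Int × Int × Int) (k : Int × Int) (hk : k ≠ c.2) :
    (bStep g h w e c).get? k = e.get? k := by
  have hk2 : k ≠ (c.2.1, c.2.2) := by simpa using hk
  simp only [bStep]
  split_ifs <;> simp [PySem.Dict.get?_insert, hk2]

lemma bEnd_fold_inv (g : List (List Int)) (h w : Int) :
    ∀ (l pfx : List (Int × Int × Int)) (e : PySem.Dict (Int × Int) (Int × Int)),
      bCells g h w = pfx ++ l →
      (∀ c ∈ pfx, e.get? c.2 = some (descentA g h w (meas g h w c.2.1 c.2.2 + 1) c.2.1 c.2.2)) →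
      ∀ c ∈ pfx ++ l, (l.foldl (bStep g h w) e).get? c.2 =
        some (descentA g h w (meas g h w c.2.1 c.2.2 + 1) c.2.1 c.2.2) := by
  intro l
  induction l with
  | nil =>
    intro pfx e _ I1 c hc
    simpa using I1 c (by simpa using hc)
  | cons d l ih =>
    intro pfx e hsplit I1 c hc
    obtain ⟨dv, y, x⟩ := d
    have hdmem : ((dv, y, x) : Int × Int × Int) ∈ bCells g h w := by rw [hsplit]; simp
    obtain ⟨hdeq, hdval⟩ := mem_bCells.1 hdmem
    simp only at hdeq hdval
    have hdv : dv = at2 g y x := by simpa using congrArg Prod.fst hdeq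
    subst hdv
    -- the coordinate is not a coordinate of pfx
    have hnotin : ∀ c' ∈ pfx, c'.2 ≠ ((at2 g y x, y, x) : Int × Int × Int).2 := by
      have hnd := nodup_coords_bCells g h w
      rw [hsplit, List.map_append] at hnd
      have hdisj := List.disjoint_of_nodup_append hnd
      intro c' hc' heq
      exact hdisj (List.mem_map_of_mem hc') (by simp [heq])
    -- strictly lower valid cells are in pfx
    have hin : ∀ ny nx, validC h w ny nx → at2 g ny nx < at2 g y x →
        (at2 g ny nx, ny, nx) ∈ pfx := by
      intro ny nx hnval hnlt
      have hmem : ((at2 g ny nx, ny, nx) : Int × Int × Int) ∈ bCells g h w :=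
        mem_bCells.2 ⟨rfl, hnval⟩
      rw [hsplit] at hmem
      rcases List.mem_append.1 hmem with h1 | h1
      · exact h1
      · exfalso
        have hpw : (bCells g h w).Pairwise (fun a b => a.1 ≤ b.1) :=
          PySem.List.sorted_pairwise _ _
        rw [hsplit] at hpw
        have hpw2 := (List.pairwise_append.1 hpw).2.1
        rcases List.mem_cons.1 h1 with heq | h2
        · have : at2 g ny nx = at2 g y x := by
            simpa using congrArg Prod.fst heq
          omega
        · have := (List.pairwise_cons.1 hpw2).1 _ h2
          simp only at this
          omega
    -- the new entry is correct
    have hstep : (bStep g h w e (at2 g y x, y, x)).get? (y, x) =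
        some (descentA g h w (meas g h w y x + 1) y x) := by
      have hgd : ∀ ny nx, validC h w ny nx → at2 g ny nx < at2 g y x →
          e.getD (ny, nx) (ny, nx) = descentA g h w (meas g h w ny nx + 1) ny nx := by
        intro ny nx hnval hnlt
        have := I1 _ (hin ny nx hnval hnlt)
        simp only at this
        rw [PySem.Dict.getD_eq_get?_getD, this]
        rfl
      obtain ⟨hy0, hyh, hx0, hxw⟩ := hdval
      have hST : ∀ ny nx, validC h w ny nx → at2 g ny nx < at2 g y x →
          descentA g h w (meas g h w y x) ny nx = descentA g h w (meas g h w ny nx + 1) ny nx := by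
        intro ny nx hnval hnlt
        have hm := meas_lt (g := g) ⟨hy0, hyh, hx0, hxw⟩ hnval hnlt
        exact descentA_stable g h w (meas g h w y x) ny nx hnval hm _ _ hm (by omega)
      simp only [bStep, descentA]
      by_cases h9 : at2 g y x = 9
      · simp [h9]
      by_cases c1 : y < h - 1 ∧ at2 g (y+1) x < at2 g y x
      · have hnval : validC h w (y+1) x := ⟨by omega, by omega, hx0, hxw⟩
        have hb1 : 0 ≤ y+1 ∧ y+1 < h ∧ 0 ≤ x ∧ x < w ∧ at2 g (y+1) x < at2 g y x :=
          ⟨by omega, by omega, hx0, hxw, c1.2⟩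
        rw [if_neg h9, if_pos hb1, if_neg h9, if_pos c1,
          hgd _ _ hnval c1.2, ← hST _ _ hnval c1.2]
        simp
      by_cases c2 : 0 < y ∧ at2 g (y-1) x < at2 g y x
      · have hnval : validC h w (y-1) x := ⟨by omega, by omega, hx0, hxw⟩
        have hb1 : ¬(0 ≤ y+1 ∧ y+1 < h ∧ 0 ≤ x ∧ x < w ∧ at2 g (y+1) x < at2 g y x) :=
          fun hcon => c1 ⟨by omega, hcon.2.2.2.2⟩
        have hb2 : 0 ≤ y-1 ∧ y-1 < h ∧ 0 ≤ x ∧ x < w ∧ at2 g (y-1) x < at2 g y x :=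
          ⟨by omega, by omega, hx0, hxw, c2.2⟩
        rw [if_neg h9, if_neg hb1, if_pos hb2, if_neg h9, if_neg c1, if_pos c2,
          hgd _ _ hnval c2.2, ← hST _ _ hnval c2.2]
        simp
      by_cases c3 : x < w - 1 ∧ at2 g y (x+1) < at2 g y x
      · have hnval : validC h w y (x+1) := ⟨hy0, hyh, by omega, by omega⟩
        have hb1 : ¬(0 ≤ y+1 ∧ y+1 < h ∧ 0 ≤ x ∧ x < w ∧ at2 g (y+1) x < at2 g y x) :=
          fun hcon => c1 ⟨by omega, hcon.2.2.2.2⟩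
        have hb2 : ¬(0 ≤ y-1 ∧ y-1 < h ∧ 0 ≤ x ∧ x < w ∧ at2 g (y-1) x < at2 g y x) :=
          fun hcon => c2 ⟨by omega, hcon.2.2.2.2⟩
        have hb3 : 0 ≤ y ∧ y < h ∧ 0 ≤ x+1 ∧ x+1 < w ∧ at2 g y (x+1) < at2 g y x :=
          ⟨hy0, hyh, by omega, by omega, c3.2⟩
        rw [if_neg h9, if_neg hb1, if_neg hb2, if_pos hb3, if_neg h9, if_neg c1, if_neg c2,
          if_pos c3, hgd _ _ hnval c3.2, ← hST _ _ hnval c3.2]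
        simp
      by_cases c4 : 0 < x ∧ at2 g y (x-1) < at2 g y x
      · have hnval : validC h w y (x-1) := ⟨hy0, hyh, by omega, by omega⟩
        have hb1 : ¬(0 ≤ y+1 ∧ y+1 < h ∧ 0 ≤ x ∧ x < w ∧ at2 g (y+1) x < at2 g y x) :=
          fun hcon => c1 ⟨by omega, hcon.2.2.2.2⟩
        have hb2 : ¬(0 ≤ y-1 ∧ y-1 < h ∧ 0 ≤ x ∧ x < w ∧ at2 g (y-1) x < at2 g y x) :=
          fun hcon => c2 ⟨by omega, hcon.2.2.2.2⟩
        have hb3 : ¬(0 ≤ y ∧ y < h ∧ 0 ≤ x+1 ∧ x+1 < w ∧ at2 g y (x+1) < at2 g y x) :=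
          fun hcon => c3 ⟨by omega, hcon.2.2.2.2⟩
        have hb4 : 0 ≤ y ∧ y < h ∧ 0 ≤ x-1 ∧ x-1 < w ∧ at2 g y (x-1) < at2 g y x :=
          ⟨hy0, hyh, by omega, by omega, c4.2⟩
        rw [if_neg h9, if_neg hb1, if_neg hb2, if_neg hb3, if_pos hb4, if_neg h9, if_neg c1,
          if_neg c2, if_neg c3, if_pos c4, hgd _ _ hnval c4.2, ← hST _ _ hnval c4.2]
        simp
      · have hb1 : ¬(0 ≤ y+1 ∧ y+1 < h ∧ 0 ≤ x ∧ x < w ∧ at2 g (y+1) x < at2 g y x) :=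
          fun hcon => c1 ⟨by omega, hcon.2.2.2.2⟩
        have hb2 : ¬(0 ≤ y-1 ∧ y-1 < h ∧ 0 ≤ x ∧ x < w ∧ at2 g (y-1) x < at2 g y x) :=
          fun hcon => c2 ⟨by omega, hcon.2.2.2.2⟩
        have hb3 : ¬(0 ≤ y ∧ y < h ∧ 0 ≤ x+1 ∧ x+1 < w ∧ at2 g y (x+1) < at2 g y x) :=
          fun hcon => c3 ⟨by omega, hcon.2.2.2.2⟩
        have hb4 : ¬(0 ≤ y ∧ y < h ∧ 0 ≤ x-1 ∧ x-1 < w ∧ at2 g y (x-1) < at2 g y x) :=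
          fun hcon => c4 ⟨by omega, hcon.2.2.2.2⟩
        rw [if_neg h9, if_neg hb1, if_neg hb2, if_neg hb3, if_neg hb4, if_neg h9, if_neg c1,
          if_neg c2, if_neg c3, if_neg c4]
        simp
    -- apply IH with pfx ++ [(…)]
    have happ : bCells g h w = (pfx ++ [(at2 g y x, y, x)]) ++ l := by rw [hsplit]; simp
    have I1' : ∀ c' ∈ pfx ++ [((at2 g y x, y, x) : Int × Int × Int)],
        (bStep g h w e (at2 g y x, y, x)).get? c'.2 =
        some (descentA g h w (meas g h w c'.2.1 c'.2.2 + 1) c'.2.1 c'.2.2) := by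
      intro c' hc'
      rcases List.mem_append.1 hc' with h1 | h1
      · rw [bStep_get?_ne g h w e _ _ (hnotin c' h1)]
        exact I1 c' h1
      · simp only [List.mem_singleton] at h1
        subst h1
        exact hstep
    have := ih (pfx ++ [(at2 g y x, y, x)]) (bStep g h w e (at2 g y x, y, x)) happ I1' c (by
      simpa using hc)
    rw [List.foldl_cons]
    simpa using this

lemma bEnd_get? (g : List (List Int)) (h w : Int) :
    ∀ y x, validC h w y x →
      (bEnd g h w).get? (y, x) = some (descentA g h w (meas g h w y x + 1) y x) := by
  intro y x hv
  have := bEnd_fold_inv g h w (bCells g h w) [] PySem.Dict.empty (by simp)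
    (by intro c hc; cases hc) (at2 g y x, y, x)
    (by simpa using mem_bCells.2 ⟨rfl, hv⟩)
  simpa using this

-- inner loop: enumerate-based fold equals range-based fold when only the index is used
lemma inner_eq (row : List Int) (F : PySem.Dict (Int × Int) Int → Int → PySem.Dict (Int × Int) Int)
    (d : PySem.Dict (Int × Int) Int) :
    (PySem.List.enumerate row).foldl (fun d q => F d q.1) d =
    (PySem.List.pyRange 0 (row.length : Int) 1).foldl F d := by
  have hm := PySem.List.map_fst_enumerate row 0
  rw [zero_add] at hm
  rw [← hm, List.foldl_map]

lemma len_allCoords (h w : Int) : (allCoords h w).length = h.toNat * w.toNat := by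
  unfold allCoords
  rw [List.length_flatMap]
  rw [List.map_congr_left (g := fun _ => w.toNat) (by
    intro a _; simp [PySem.List.length_pyRange_one])]
  simp [List.map_const', PySem.List.length_pyRange_one]

lemma flatten_len (g : List (List Int)) (w0 : Nat) (hrect : ∀ row ∈ g, row.length = w0) :
    g.flatten.length = g.length * w0 := by
  rw [List.length_flatten]
  rw [List.map_congr_left (g := fun _ => w0) (by intro a ha; simp [hrect a ha])]
  simp [List.map_const']

lemma countFold_eq (g : List (List Int)) (h w : Int) (K1 K2 : Int → Int → Int × Int)
    (hrect : ∀ row ∈ g, (row.length : Int) = w) (hh : h = (g.length : Int))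
    (hK : ∀ y x, validC h w y x → K1 y x = K2 y x) :
    (PySem.List.enumerate g).foldl (fun d p =>
      (PySem.List.enumerate p.2).foldl (fun d q => bump d (K1 p.1 q.1)) d) PySem.Dict.empty =
    (PySem.List.pyRange 0 h 1).foldl (fun d y =>
      (PySem.List.pyRange 0 w 1).foldl (fun d x => bump d (K2 y x)) d) PySem.Dict.empty := by
  have step1 : (PySem.List.enumerate g).foldl (fun d p =>
      (PySem.List.enumerate p.2).foldl (fun d q => bump d (K1 p.1 q.1)) d) PySem.Dict.empty =
      (PySem.List.enumerate g).foldl (fun d p =>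
      (PySem.List.pyRange 0 w 1).foldl (fun d x => bump d (K1 p.1 x)) d) PySem.Dict.empty := by
    apply PySem.List.foldl_congr_mem
    intro d p hp
    rw [inner_eq p.2 (fun d x => bump d (K1 p.1 x)) d]
    have : ((p.2.length : Int)) = w := by
      apply hrect
      obtain ⟨k, hk, rfl⟩ := (PySem.List.mem_enumerate_iff g 0 p).1 hp
      simp [List.getElem_mem]
    rw [this]
  rw [step1]
  have hm := PySem.List.map_fst_enumerate g 0
  rw [zero_add, ← hh] at hm
  have step2 : (PySem.List.enumerate g).foldl (fun d p =>
      (PySem.List.pyRange 0 w 1).foldl (fun d x => bump d (K1 p.1 x)) d) PySem.Dict.empty =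
      (PySem.List.enumerate g).foldl (fun d p =>
      (PySem.List.pyRange 0 w 1).foldl (fun d x => bump d (K2 p.1 x)) d) PySem.Dict.empty := by
    apply PySem.List.foldl_congr_mem
    intro d p hp
    apply PySem.List.foldl_congr_mem
    intro d' x hx
    obtain ⟨k, hk, rfl⟩ := (PySem.List.mem_enumerate_iff g 0 p).1 hp
    rw [hK _ x ⟨by simp, by simp [hh]; exact_mod_cast hk,
      (PySem.List.mem_pyRange_one.1 hx).1, (PySem.List.mem_pyRange_one.1 hx).2⟩]
  rw [step2, ← hm, List.foldl_map]

-- ===== VERDICT (by name: the statement is the Claim_ definition above) =====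
theorem part2_spec : Claim_equal_part2 := by
  intro heights _ hpre
  obtain ⟨hne, hrect0⟩ := hpre
  unfold Spec_part2 part2 part2_alt
  simp only
  apply congrArg tailProd
  have hw : PySem.List.pyGetD heights 0 [] = heights.headD [] := by
    cases heights with
    | nil => exact absurd rfl hne
    | cons r t => simp [PySem.List.pyGetD_zero_cons]
  have hrect : ∀ row ∈ heights, (row.length : Int) =
      ((PySem.List.pyGetD heights 0 []).length : Int) := by
    intro row hr
    rw [hw]
    exact_mod_cast congrArg Nat.cast (hrect0 row hr)
  have hmb : ∀ y x, validC (heights.length : Int) ((PySem.List.pyGetD heights 0 []).length : Int) y x →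
      meas heights (heights.length : Int) ((PySem.List.pyGetD heights 0 []).length : Int) y x
        < heights.flatten.length + 1 := by
    intro y x _
    have h1 := meas_le heights (heights.length : Int) ((PySem.List.pyGetD heights 0 []).length : Int) y x
    rw [len_allCoords] at h1
    have h2 := flatten_len heights (PySem.List.pyGetD heights 0 []).length (by
      intro row hr
      have := hrect row hr
      exact_mod_cast this)
    simp only [Int.toNat_natCast] at h1
    omega
  apply countFold_eq
  · exact hrect
  · rfl
  · intro y x hv
    have hm := hmb y x hv
    rw [descentA_stable heights _ _ (heights.flatten.length + 1) y x hv hm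
      (heights.flatten.length + 1)
      (meas heights (heights.length : Int) ((PySem.List.pyGetD heights 0 []).length : Int) y x + 1)
      hm (by omega)]
    rw [PySem.Dict.getD_eq_get?_getD, bEnd_get? heights _ _ y x hv]
    rfl
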